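-- pv_equiv track=rewrite | github.com/raeez/chiral-bar-cobar | scripts/bar_dimensions.py | riordan
-- ===== SOURCE A (Python) =====
-- def riordan(n_max):
--     """Riordan numbers R(0), ..., R(n_max).
--     Recurrence: (n+1)*R(n) = (n-1)*(2*R(n-1) + 3*R(n-2)).
--     OEIS A005043."""
--     R = [0] * (n_max + 1)
--     R[0] = 1
--     if n_max >= 1:
--         R[1] = 0
--     for n in range(2, n_max + 1):
--         R[n] = (n - 1) * (2 * R[n - 1] + 3 * R[n - 2]) // (n + 1)
--     return R
-- ===== SOURCE B (Python) =====
-- def riordan(n_max):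
--     """Riordan numbers R(0), ..., R(n_max), computed via the Motzkin numbers:
--     R(0) = 1 and R(n) = M(n-1) - R(n-1), where M obeys
--     (n+2)*M(n) = (2n+1)*M(n-1) + 3*(n-1)*M(n-2)."""
--     M = [1, 1]
--     for n in range(2, n_max):
--         M.append(((2 * n + 1) * M[n - 1] + 3 * (n - 1) * M[n - 2]) // (n + 2))
--     out = []
--     r = 1
--     for n in range(n_max + 1):
--         if n > 0:
--             r = M[n - 1] - r
--         out.append(r)
--     return out
-- ===== Notes on version B (the rewrite author's own statement) =====
-- stated objective: alternative
-- what changed: Instead of A's direct rolling recurrence (n+1)R(n)=(n-1)(2R(n-1)+3R(n-2)) with floor division, B first builds the Motzkin numbers by their own recurrence (n+2)M(n)=(2n+1)M(n-1)+3(n-1)M(n-2) and then converts with the complement identity R(0)=1, R(n)=M(n-1)-R(n-1).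
import Mathlib
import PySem

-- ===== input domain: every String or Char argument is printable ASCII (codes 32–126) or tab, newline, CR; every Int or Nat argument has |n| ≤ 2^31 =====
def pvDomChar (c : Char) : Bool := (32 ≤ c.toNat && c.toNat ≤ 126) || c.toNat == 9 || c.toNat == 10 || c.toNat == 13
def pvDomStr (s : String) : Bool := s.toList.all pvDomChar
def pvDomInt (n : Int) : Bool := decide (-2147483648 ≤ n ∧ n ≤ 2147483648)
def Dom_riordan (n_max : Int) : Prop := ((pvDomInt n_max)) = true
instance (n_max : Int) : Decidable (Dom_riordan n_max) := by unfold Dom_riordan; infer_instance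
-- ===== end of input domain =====

-- B computes the list by a different algorithm: it builds the Motzkin numbers by their own
-- recurrence (n+2)M(n) = (2n+1)M(n-1) + 3(n-1)M(n-2) and converts with R(n) = M(n-1) - R(n-1),
-- instead of A's direct rolling recurrence on the Riordan numbers; same cost, different structure.

-- ===== PORT A =====
def riordan (n_max : Int) : List Int :=
  let R0 := List.replicate (n_max + 1).toNat (0 : Int)   -- R = [0] * (n_max + 1)
  let R1 := PySem.List.pySetD R0 0 1                     -- R[0] = 1
  let R2 := if 1 ≤ n_max then PySem.List.pySetD R1 1 0 else R1   -- if n_max >= 1: R[1] = 0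
  (PySem.List.pyRange 2 (n_max + 1) 1).foldl
    (fun R n =>
      PySem.List.pySetD R n
        (PySem.Int.floordiv
          ((n - 1) * (2 * PySem.List.pyGetD R (n - 1) 0 + 3 * PySem.List.pyGetD R (n - 2) 0))
          (n + 1)))
    R2

-- ===== PORT B =====
def riordan_alt (n_max : Int) : List Int :=
  let M := (PySem.List.pyRange 2 n_max 1).foldl
    (fun M n =>
      M ++ [PySem.Int.floordiv ((2 * n + 1) * PySem.List.pyGetD M (n - 1) 0
              + 3 * (n - 1) * PySem.List.pyGetD M (n - 2) 0) (n + 2)]) [1, 1]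
  let p := (PySem.List.pyRange 0 (n_max + 1) 1).foldl
    (fun (p : List Int × Int) n =>
      let r := if 0 < n then PySem.List.pyGetD M (n - 1) 0 - p.2 else p.2
      (p.1 ++ [r], r))
    ([], 1)
  p.1

-- ===== PRECONDITION & SPEC =====
-- Pre_ excludes exactly the inputs n_max < 0, on which A raises IndexError (R[0] = 1 on the empty list).
def Pre_riordan (n_max : Int) : Prop := 0 ≤ n_max
instance (n_max : Int) : Decidable (Pre_riordan n_max) := by unfold Pre_riordan; infer_instance
def pvWitness_riordan : Int := 5

def Spec_riordan (n_max : Int) (out : List Int) : Prop := out = riordan_alt n_max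
instance (n_max : Int) (out : List Int) : Decidable (Spec_riordan n_max out) := by unfold Spec_riordan; infer_instance

-- ===== CLAIM (what is proved, stated in full; the proofs are below) =====
def Claim_equal_riordan : Prop := ∀ (n_max : Int), Dom_riordan n_max → Pre_riordan n_max → Spec_riordan n_max (riordan n_max)

-- ===== LEMMAS AND PROOFS =====

-- Definitional (zeta-reduced) restatements of the two ports, used to rewrite under the lets.
theorem riordan_def (n_max : Int) : riordan n_max =
    (PySem.List.pyRange 2 (n_max + 1) 1).foldl
      (fun R n =>
        PySem.List.pySetD R n
          (PySem.Int.floordiv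
            ((n - 1) * (2 * PySem.List.pyGetD R (n - 1) 0 + 3 * PySem.List.pyGetD R (n - 2) 0))
            (n + 1)))
      (if 1 ≤ n_max
        then PySem.List.pySetD (PySem.List.pySetD (List.replicate (n_max + 1).toNat (0 : Int)) 0 1) 1 0
        else PySem.List.pySetD (List.replicate (n_max + 1).toNat (0 : Int)) 0 1) := rfl

theorem riordan_alt_def (n_max : Int) : riordan_alt n_max =
    ((PySem.List.pyRange 0 (n_max + 1) 1).foldl
      (fun (p : List Int × Int) n =>
        let r := if 0 < n then
            PySem.List.pyGetD ((PySem.List.pyRange 2 n_max 1).foldl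
              (fun M n =>
                M ++ [PySem.Int.floordiv ((2 * n + 1) * PySem.List.pyGetD M (n - 1) 0
                        + 3 * (n - 1) * PySem.List.pyGetD M (n - 2) 0) (n + 2)]) [1, 1])
              (n - 1) 0 - p.2
          else p.2
        (p.1 ++ [r], r))
      ([], 1)).1 := rfl

-- The alternating binomial transform Σ_{k≤n} (-1)^k C(n,k) a(k), the common spine of the proof.
def altSum (n : Nat) (a : Nat → Int) : Int :=
  ∑ k ∈ Finset.range (n+1), (-1)^k * (n.choose k : Int) * a k

-- Catalan numbers as integers.
def catZ (k : Nat) : Int := (catalan k : Int)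

-- bb n = (-1)^n Σ (-1)^k C(n,k) Cat(k): the value B computes at index n.
def bb (n : Nat) : Int := (-1)^n * altSum n catZ

-- r n: the value A computes at index n (A's recurrence with Python floor division).
def r : Nat → Int
  | 0 => 1
  | 1 => 0
  | (n+2) => PySem.Int.floordiv (((n:Int)+1) * (2 * r (n+1) + 3 * r n)) ((n:Int)+3)

theorem altSum_shift (n : Nat) (a : Nat → Int) :
    altSum (n+1) a = altSum n a - altSum n (fun k => a (k+1)) := by
  unfold altSum
  rw [Finset.sum_range_succ' (fun k => (-1:Int)^k * ((n+1).choose k : Int) * a k) (n+1),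
      Finset.sum_range_succ' (fun k => (-1:Int)^k * (n.choose k : Int) * a k) n]
  have h1 : ∑ i ∈ Finset.range (n+1), (-1:Int)^(i+1) * ((n+1).choose (i+1) : Int) * a (i+1)
      = (∑ i ∈ Finset.range (n+1), (-1:Int)^(i+1) * (n.choose (i+1) : Int) * a (i+1))
        - ∑ i ∈ Finset.range (n+1), (-1:Int)^i * (n.choose i : Int) * a (i+1) := by
    rw [← Finset.sum_sub_distrib]
    refine Finset.sum_congr rfl (fun i _ => ?_)
    rw [Nat.choose_succ_succ]
    push_cast
    ring
  have h2 : ∑ i ∈ Finset.range (n+1), (-1:Int)^(i+1) * (n.choose (i+1) : Int) * a (i+1)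
      = ∑ i ∈ Finset.range n, (-1:Int)^(i+1) * (n.choose (i+1) : Int) * a (i+1) := by
    rw [Finset.sum_range_succ, Nat.choose_eq_zero_of_lt (by omega)]
    simp
  simp only [h1, h2, Nat.choose_zero_right]
  push_cast
  ring

theorem altSum_weight (n : Nat) (a : Nat → Int) :
    ∑ k ∈ Finset.range (n+2), (-1:Int)^k * (k : Int) * ((n+1).choose k : Int) * a k
      = -((n:Int)+1) * altSum n (fun k => a (k+1)) := by
  unfold altSum
  rw [Finset.sum_range_succ' (fun k => (-1:Int)^k * (k : Int) * ((n+1).choose k : Int) * a k) (n+1)]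
  rw [Finset.mul_sum]
  have h1 : ∀ i ∈ Finset.range (n+1),
      (-1:Int)^(i+1) * ((i+1 : Nat) : Int) * ((n+1).choose (i+1) : Int) * a (i+1)
      = -((n:Int)+1) * ((-1:Int)^i * (n.choose i : Int) * (fun k => a (k+1)) i) := by
    intro i _
    have h' : ((n:Int)+1) * (n.choose i : Int) = ((n+1).choose (i+1) : Int) * ((i:Int)+1) := by
      exact_mod_cast Nat.add_one_mul_choose_eq n i
    push_cast
    linear_combination ((-1:Int)^i * a (i+1)) * h'
  rw [Finset.sum_congr rfl h1]
  simp

theorem cat_step (k : Nat) : (k+2) * catalan (k+1) = 2*(2*k+1) * catalan k := by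
  apply Nat.eq_of_mul_eq_mul_left (show 0 < k+1 by omega)
  nlinarith [succ_mul_catalan_eq_centralBinom (k+1), Nat.succ_mul_centralBinom_succ k,
    succ_mul_catalan_eq_centralBinom k]

theorem catZ_step (k : Nat) : ((k:Int)+2) * catZ (k+1) = 2*(2*(k:Int)+1) * catZ k := by
  unfold catZ; exact_mod_cast cat_step k

theorem key (n : Nat) :
    ((n:Int)+3) * altSum (n+1) (fun k => catZ (k+1))
      = -3*((n:Int)+1) * altSum n (fun k => catZ (k+1)) + 2 * altSum (n+1) catZ := by
  have hz : ∑ k ∈ Finset.range (n+2),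
      (-1:Int)^k * ((n+1).choose k : Int) * (((k:Int)+2) * catZ (k+1) - 2*(2*(k:Int)+1) * catZ k) = 0 := by
    apply Finset.sum_eq_zero; intro k _
    rw [catZ_step k]; ring
  have hexp : ∑ k ∈ Finset.range (n+2),
      (-1:Int)^k * ((n+1).choose k : Int) * (((k:Int)+2) * catZ (k+1) - 2*(2*(k:Int)+1) * catZ k)
      = (∑ k ∈ Finset.range (n+2), (-1:Int)^k * (k:Int) * ((n+1).choose k : Int) * catZ (k+1))
        + 2 * altSum (n+1) (fun k => catZ (k+1))
        - 4 * (∑ k ∈ Finset.range (n+2), (-1:Int)^k * (k:Int) * ((n+1).choose k : Int) * catZ k)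
        - 2 * altSum (n+1) catZ := by
    unfold altSum
    simp only [Finset.mul_sum, ← Finset.sum_add_distrib, ← Finset.sum_sub_distrib]
    exact Finset.sum_congr rfl (fun k _ => by ring)
  have W1 := altSum_weight n (fun k => catZ (k+1))
  have W2 := altSum_weight n catZ
  have Sh := altSum_shift n (fun k => catZ (k+1))
  simp only at W1 W2 Sh hexp
  rw [hexp, W1, W2] at hz
  linear_combination hz + ((n:Int)+1) * Sh

theorem hol (n : Nat) :
    ((n:Int)+3) * altSum (n+2) catZ = ((n:Int)+1) * (-2 * altSum (n+1) catZ + 3 * altSum n catZ) := by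
  have P1 := altSum_shift (n+1) catZ
  have P0 := altSum_shift n catZ
  have K := key n
  push_cast at P1
  linear_combination ((n:Int)+3)*P1 - K + 3*((n:Int)+1)*P0

theorem bb_hol (n : Nat) :
    ((n:Int)+3) * bb (n+2) = ((n:Int)+1) * (2 * bb (n+1) + 3 * bb n) := by
  unfold bb
  have h := hol n
  have hp : ((-1:Int))^(n+2) = (-1)^n := by ring
  have hp1 : ((-1:Int))^(n+1) = -(-1)^n := by ring
  rw [hp, hp1]
  linear_combination ((-1:Int)^n) * h

theorem bb_zero : bb 0 = 1 := by
  simp [bb, altSum, catZ]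

theorem bb_one : bb 1 = 0 := by
  simp [bb, altSum, Finset.sum_range_succ, catZ, catalan_one]

theorem r_eq_bb (n : Nat) : r n = bb n := by
  induction n using Nat.strong_induction_on with
  | _ n ih =>
    match n with
    | 0 => simpa [r] using bb_zero.symm
    | 1 => simpa [r] using bb_one.symm
    | (m+2) =>
      have h1 : r (m+1) = bb (m+1) := ih (m+1) (by omega)
      have h0 : r m = bb m := ih m (by omega)
      show PySem.Int.floordiv (((m:Int)+1) * (2 * r (m+1) + 3 * r m)) ((m:Int)+3) = bb (m+2)
      rw [h1, h0]
      have hmul : ((m:Int)+1) * (2 * bb (m+1) + 3 * bb m) = ((m:Int)+3) * bb (m+2) := by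
        linarith [bb_hol m]
      rw [hmul, PySem.Int.floordiv_eq_ediv_of_pos (by positivity)]
      rw [Int.mul_ediv_cancel_left _ (by positivity)]

-- ---------- A-side: the loop computes map r ----------

theorem A_loop (N : Nat) : ∀ d m, 2 ≤ m → m + d = N + 1 →
    (PySem.List.pyRange (m : Int) ((N : Int)+1) 1).foldl
      (fun R n =>
        PySem.List.pySetD R n
          (PySem.Int.floordiv
            ((n - 1) * (2 * PySem.List.pyGetD R (n - 1) 0 + 3 * PySem.List.pyGetD R (n - 2) 0))
            (n + 1)))
      ((List.range m).map r ++ List.replicate d 0)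
    = (List.range (N+1)).map r := by
  intro d
  induction d with
  | zero =>
    intro m hm2 hm
    have : m = N + 1 := by omega
    subst this
    rw [show ((N:Int)+1) = ((N+1 : Nat) : Int) by push_cast; ring,
      PySem.List.pyRange_one_eq_nil (le_refl _)]
    simp
  | succ t ih =>
    intro m hm2 hm
    have hmN : (m : Int) < (N : Int) + 1 := by exact_mod_cast (by omega : (m:Int) < ((N+1:Nat):Int))
    rw [PySem.List.pyRange_one_cons hmN, List.foldl_cons]
    set L := (List.range m).map r ++ List.replicate (t+1) 0 with hL
    have hlen1 : ((List.range m).map r).length = m := by simp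
    have hg1 : PySem.List.pyGetD L ((m:Int) - 1) 0 = r (m-1) := by
      rw [show (m:Int) - 1 = ((m-1 : Nat) : Int) by omega, PySem.List.pyGetD_natCast, hL,
        List.getD_append _ _ _ _ (by simp; omega), PySem.List.getD_map_range _ _ _ _ (by omega)]
    have hg2 : PySem.List.pyGetD L ((m:Int) - 2) 0 = r (m-2) := by
      rw [show (m:Int) - 2 = ((m-2 : Nat) : Int) by omega, PySem.List.pyGetD_natCast, hL,
        List.getD_append _ _ _ _ (by simp; omega), PySem.List.getD_map_range _ _ _ _ (by omega)]
    have hval : PySem.Int.floordiv (((m:Int) - 1) * (2 * r (m-1) + 3 * r (m-2))) ((m:Int) + 1)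
        = r m := by
      rw [show m-1 = (m-2)+1 by omega, show (m:Int)-1 = ((m-2:Nat):Int)+1 by omega,
        show (m:Int)+1 = ((m-2:Nat):Int)+3 by omega]
      conv_rhs => rw [show m = (m-2)+2 by omega]
      rfl
    have hset : PySem.List.pySetD L (m : Int)
        (PySem.Int.floordiv (((m:Int) - 1) * (2 * PySem.List.pyGetD L ((m:Int) - 1) 0 + 3 * PySem.List.pyGetD L ((m:Int) - 2) 0)) ((m:Int) + 1))
        = (List.range (m+1)).map r ++ List.replicate t 0 := by
      rw [hg1, hg2, hval, PySem.List.pySetD_natCast, hL, List.set_append]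
      rw [if_neg (by simp)]
      simp only [hlen1, Nat.sub_self]
      rw [show List.replicate (t+1) (0:Int) = 0 :: List.replicate t 0 from rfl, List.set_cons_zero]
      rw [List.range_succ, List.map_append]
      simp
    rw [hset]
    have hnext := ih (m+1) (by omega) (by omega)
    rw [show ((m:Int)+1) = ((m+1 : Nat) : Int) by push_cast; ring]
    exact hnext

theorem riordan_eq_map (N : Nat) : riordan (N : Int) = (List.range (N+1)).map r := by
  rw [riordan_def]
  have h0 : ((N:Int)+1).toNat = N+1 := by omega
  rw [h0]
  have hR1 : PySem.List.pySetD (List.replicate (N+1) (0:Int)) 0 1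
      = 1 :: List.replicate N 0 := by
    rw [PySem.List.pySetD_of_nonneg _ _ (by norm_num)]
    rfl
  by_cases hN : 1 ≤ (N : Int)
  · have hN1 : 1 ≤ N := by exact_mod_cast hN
    rw [if_pos hN, hR1]
    have hR2 : PySem.List.pySetD (1 :: List.replicate N (0:Int)) 1 0
        = (List.range 2).map r ++ List.replicate (N-1) 0 := by
      rw [PySem.List.pySetD_of_nonneg _ _ (by norm_num)]
      rw [show List.replicate N (0:Int) = 0 :: List.replicate (N-1) 0 by
        rw [show N = (N-1)+1 by omega]; rfl]
      rfl
    rw [hR2]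
    have hA := A_loop N (N-1) 2 (le_refl 2) (by omega)
    rw [show ((2:Nat):Int) = (2:Int) by norm_num] at hA
    exact hA
  · have hN0 : N = 0 := by omega
    subst hN0
    rw [if_neg hN]
    rw [PySem.List.pyRange_one_eq_nil (by norm_num), List.foldl_nil, hR1]
    rfl

-- ---------- B-side: Motzkin numbers and the loops ----------

-- mm n = (-1)^n Σ (-1)^k C(n,k) Cat(k+1): the n-th Motzkin number (as this proof constructs it).
def mm (n : Nat) : Int := (-1)^n * altSum n (fun k => catZ (k+1))

theorem mm_rec (n : Nat) :
    ((n:Int)+4) * mm (n+2) = (2*(n:Int)+5) * mm (n+1) + 3*((n:Int)+1) * mm n := by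
  unfold mm
  have K0 := key n
  have K1 := key (n+1)
  have P := altSum_shift (n+1) catZ
  push_cast at K1
  have hp2 : ((-1:Int))^(n+2) = (-1)^n := by ring
  have hp1 : ((-1:Int))^(n+1) = -(-1)^n := by ring
  rw [hp2, hp1]
  linear_combination ((-1:Int)^n) * K1 + (2*(-1:Int)^n) * P - ((-1:Int)^n) * K0

theorem mm_zero : mm 0 = 1 := by
  simp [mm, altSum, catZ, catalan_one]

theorem mm_one : mm 1 = 1 := by
  simp [mm, altSum, Finset.sum_range_succ, catZ, catalan_one, catalan_two]

theorem bb_step (n : Nat) : bb (n+1) = mm n - bb n := by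
  unfold bb mm
  have P := altSum_shift n catZ
  have hp1 : ((-1:Int))^(n+1) = -(-1)^n := by ring
  rw [hp1]
  linear_combination (-(-1:Int)^n) * P

theorem M_loop (N : Nat) : ∀ d j, 2 ≤ j → j + d = max N 2 →
    (PySem.List.pyRange (j : Int) (N : Int) 1).foldl
      (fun M n =>
        M ++ [PySem.Int.floordiv ((2 * n + 1) * PySem.List.pyGetD M (n - 1) 0
                + 3 * (n - 1) * PySem.List.pyGetD M (n - 2) 0) (n + 2)])
      ((List.range j).map mm)
    = (List.range (max N 2)).map mm := by
  intro d
  induction d with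
  | zero =>
    intro j hj2 hj
    have hNj : (N : Int) ≤ (j : Int) := by exact_mod_cast (by omega : N ≤ j)
    rw [PySem.List.pyRange_one_eq_nil hNj, List.foldl_nil]
    rw [show j = max N 2 by omega]
  | succ t ih =>
    intro j hj2 hj
    have hjN : (j : Int) < (N : Int) := by exact_mod_cast (by omega : j < N)
    rw [PySem.List.pyRange_one_cons hjN, List.foldl_cons]
    have hg1 : PySem.List.pyGetD ((List.range j).map mm) ((j:Int) - 1) 0 = mm (j-1) := by
      rw [show (j:Int) - 1 = ((j-1 : Nat) : Int) by omega, PySem.List.pyGetD_natCast,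
        PySem.List.getD_map_range _ _ _ _ (by omega)]
    have hg2 : PySem.List.pyGetD ((List.range j).map mm) ((j:Int) - 2) 0 = mm (j-2) := by
      rw [show (j:Int) - 2 = ((j-2 : Nat) : Int) by omega, PySem.List.pyGetD_natCast,
        PySem.List.getD_map_range _ _ _ _ (by omega)]
    have hval : PySem.Int.floordiv
        ((2 * (j:Int) + 1) * mm (j-1) + 3 * ((j:Int) - 1) * mm (j-2)) ((j:Int) + 2) = mm j := by
      have hr := mm_rec (j-2)
      rw [show (j-2)+2 = j by omega, show (j-2)+1 = j-1 by omega] at hr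
      have hnum : (2 * (j:Int) + 1) * mm (j-1) + 3 * ((j:Int) - 1) * mm (j-2)
          = ((j:Int) + 2) * mm j := by
        have e1 : ((j-2:Nat):Int) + 4 = (j:Int) + 2 := by omega
        have e2 : 2*((j-2:Nat):Int) + 5 = 2 * (j:Int) + 1 := by omega
        have e3 : 3*(((j-2:Nat):Int) + 1) = 3 * ((j:Int) - 1) := by omega
        rw [e1, e2, e3] at hr
        linarith [hr]
      rw [hnum, PySem.Int.floordiv_eq_ediv_of_pos (by positivity),
        Int.mul_ediv_cancel_left _ (by positivity)]
    rw [hg1, hg2, hval]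
    have happ : (List.range j).map mm ++ [mm j] = (List.range (j+1)).map mm := by
      simp [List.range_succ, List.map_append]
    rw [happ]
    have hnext := ih (j+1) (by omega) (by omega)
    rw [show ((j:Int)+1) = ((j+1 : Nat) : Int) by push_cast; ring]
    exact hnext

theorem R_loop (N : Nat) : ∀ d j, j + d = N + 1 →
    (PySem.List.pyRange (j : Int) ((N : Int)+1) 1).foldl
      (fun (p : List Int × Int) n =>
        let r := if 0 < n then
            PySem.List.pyGetD ((List.range (max N 2)).map mm) (n - 1) 0 - p.2
          else p.2
        (p.1 ++ [r], r))
      ((List.range j).map bb, bb (j-1))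
    = ((List.range (N+1)).map bb, bb N) := by
  intro d
  induction d with
  | zero =>
    intro j hj
    have : j = N + 1 := by omega
    subst this
    rw [show ((N:Int)+1) = ((N+1 : Nat) : Int) by push_cast; ring,
      PySem.List.pyRange_one_eq_nil (le_refl _)]
    simp only [List.foldl_nil]
    rw [show N+1-1 = N by omega]
  | succ t ih =>
    intro j hj
    have hjN : (j : Int) < (N : Int) + 1 := by exact_mod_cast (by omega : (j:Int) < ((N+1:Nat):Int))
    rw [PySem.List.pyRange_one_cons hjN, List.foldl_cons]
    simp only
    have hr : (if (0:Int) < (j:Int) then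
          PySem.List.pyGetD ((List.range (max N 2)).map mm) ((j:Int) - 1) 0 - bb (j-1)
        else bb (j-1)) = bb j := by
      by_cases h1 : 1 ≤ j
      · rw [if_pos (by exact_mod_cast h1)]
        rw [show (j:Int) - 1 = ((j-1 : Nat) : Int) by omega, PySem.List.pyGetD_natCast,
          PySem.List.getD_map_range _ _ _ _ (by omega)]
        have hb := bb_step (j-1)
        rw [show (j-1)+1 = j by omega] at hb
        linarith [hb]
      · have hj0 : j = 0 := by omega
        subst hj0
        rw [if_neg (by norm_num)]
    rw [hr]
    have happ : (List.range j).map bb ++ [bb j] = (List.range (j+1)).map bb := by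
      simp [List.range_succ, List.map_append]
    rw [happ]
    have hnext := ih (j+1) (by omega)
    rw [show j+1-1 = j by omega] at hnext
    rw [show ((j:Int)+1) = ((j+1 : Nat) : Int) by push_cast; ring]
    exact hnext

theorem riordan_alt_eq_map (N : Nat) : riordan_alt (N : Int) = (List.range (N+1)).map bb := by
  rw [riordan_alt_def]
  have hM : (PySem.List.pyRange 2 (N : Int) 1).foldl
      (fun M n =>
        M ++ [PySem.Int.floordiv ((2 * n + 1) * PySem.List.pyGetD M (n - 1) 0
                + 3 * (n - 1) * PySem.List.pyGetD M (n - 2) 0) (n + 2)]) [1, 1]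
      = (List.range (max N 2)).map mm := by
    have h2 : ([1, 1] : List Int) = (List.range 2).map mm := by
      simp [List.range_succ, mm_zero, mm_one]
    rw [h2]
    have hm := M_loop N (max N 2 - 2) 2 (le_refl 2) (by omega)
    rw [show ((2:Nat):Int) = (2:Int) by norm_num] at hm
    exact hm
  rw [hM]
  have hinit : (([], 1) : List Int × Int) = ((List.range 0).map bb, bb (0-1)) := by
    simp [bb_zero]
  rw [hinit]
  have hR := R_loop N (N+1) 0 (by omega)
  rw [show ((0:Nat):Int) = (0:Int) by norm_num] at hR
  rw [hR]

-- ===== VERDICT (by name: the statement is the Claim_ definition above) =====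
theorem riordan_spec : Claim_equal_riordan := by
  intro n_max _ hpre
  unfold Spec_riordan
  obtain ⟨N, rfl⟩ : ∃ N : Nat, n_max = (N : Int) := ⟨n_max.toNat, (Int.toNat_of_nonneg hpre).symm⟩
  rw [riordan_eq_map, riordan_alt_eq_map]
  exact List.map_congr_left (fun k _ => r_eq_bb k)
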